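-- pv_equiv track=rewrite | github.com/Cao-Labs/AnglesRefine | AnglesRefine.py | generate_slices
-- ===== SOURCE A (Python) =====
-- def generate_slices(s):
--     slices=[]
--     left = 0
--     right = left+1
--     char_win = list()
--     while right < len(s):
--         char_win.append(s[right])
--         if s[right] == s[left]:
--             right += 1
--         else:
--             slices.append(s[left:right])
--             left = right
--             right += 1
--     slices.append(s[left:right])
--     return slices
-- ===== SOURCE B (Python) =====
-- def generate_slices(s):
--     # Phase 1: boundary table — indices where a new run starts.
--     cuts = [0]
--     for i in range(1, len(s)):
--         if s[i] != s[i - 1]: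
--             cuts.append(i)
--     cuts.append(len(s))
--     # Phase 2: slice between consecutive boundaries.
--     return [s[a:b] for a, b in zip(cuts, cuts[1:])]
-- ===== Notes on version B (the rewrite author's own statement) =====
-- stated objective: alternative
-- what changed: A's single interleaved anchor/right pointer loop that cuts slices as it scans (and uselessly accumulates char_win) is replaced by a two-phase strategy: first build a boundary-index table (indices where adjacent characters differ), then slice the string between consecutive boundaries with a zip comprehension.
import Mathlib
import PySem

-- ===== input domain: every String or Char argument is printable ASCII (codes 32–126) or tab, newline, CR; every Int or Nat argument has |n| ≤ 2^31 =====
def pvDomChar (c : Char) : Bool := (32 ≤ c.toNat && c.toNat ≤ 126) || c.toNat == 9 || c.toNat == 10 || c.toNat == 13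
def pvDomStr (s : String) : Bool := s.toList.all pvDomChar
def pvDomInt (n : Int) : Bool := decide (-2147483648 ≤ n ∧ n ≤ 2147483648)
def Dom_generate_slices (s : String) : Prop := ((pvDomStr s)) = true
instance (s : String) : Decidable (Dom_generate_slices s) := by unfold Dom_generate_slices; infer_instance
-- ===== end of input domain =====

-- B replaces A's interleaved pointer-and-cut loop by a two-phase boundary-table-then-slice
-- strategy (objective: alternative decomposition, same O(n) cost).

-- ===== PORT A =====
-- the while loop of A: state (slices, left, right, char_win)
def genA_loop (cs : List Char) (slices : List String) (left right : Nat) (char_win : List Char) : List String :=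
  if _h : right < cs.length then
    if PySem.List.pyGetD cs (right : Int) ' ' = PySem.List.pyGetD cs (left : Int) ' ' then
      genA_loop cs slices left (right + 1) (char_win ++ [PySem.List.pyGetD cs (right : Int) ' '])
    else
      genA_loop cs (slices ++ [String.ofList (PySem.Chars.slice cs (some (left : Int)) (some (right : Int)))])
        right (right + 1) (char_win ++ [PySem.List.pyGetD cs (right : Int) ' '])
  else
    slices ++ [String.ofList (PySem.Chars.slice cs (some (left : Int)) (some (right : Int)))]
termination_by cs.length - right
decreasing_by all_goals omega

def generate_slices (s : String) : List String :=
  genA_loop s.toList [] 0 1 []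

-- ===== PORT B =====
-- phase 1 of B: the boundary table cuts = [0] + [i in 1..n-1 with s[i] != s[i-1]] + [n]
def gsCuts (cs : List Char) : List Int :=
  ((PySem.List.pyRange 1 (cs.length : Int)).foldl
    (fun cuts i =>
      if PySem.List.pyGetD cs i ' ' ≠ PySem.List.pyGetD cs (i - 1) ' ' then cuts ++ [i] else cuts)
    [0]) ++ [(cs.length : Int)]

-- phase 2 of B: [s[a:b] for a, b in zip(cuts, cuts[1:])]
def generate_slices_alt (s : String) : List String :=
  let cs := s.toList
  let cuts := gsCuts cs
  (cuts.zip (PySem.List.slice cuts (some 1))).map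
    (fun p => String.ofList (PySem.Chars.slice cs (some p.1) (some p.2)))

-- ===== PRECONDITION & SPEC =====
def Spec_generate_slices (s : String) (out : List String) : Prop := out = generate_slices_alt s
instance (s : String) (out : List String) : Decidable (Spec_generate_slices s out) := by unfold Spec_generate_slices; infer_instance

-- ===== CLAIM (what is proved, stated in full; the proofs are below) =====
def Claim_equal_generate_slices : Prop := ∀ (s : String), Dom_generate_slices s → Spec_generate_slices s (generate_slices s)

-- ===== LEMMAS AND PROOFS =====

-- adjacent-pair slicing of a cut list (what B's zip comprehension computes)
def pvPm (cs : List Char) : List Int → List String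
  | a :: b :: t => String.ofList (PySem.Chars.slice cs (some a) (some b)) :: pvPm cs (b :: t)
  | _ => []

-- the boundary indices of cs from position i on
def pvBl (cs : List Char) (i : Nat) : List Int :=
  (PySem.List.pyRange (i : Int) (cs.length : Int)).filter
    (fun j => decide (PySem.List.pyGetD cs j ' ' ≠ PySem.List.pyGetD cs (j - 1) ' '))

lemma pvPm_zip (cs : List Char) (f : Int × Int → String)
    (hf : ∀ p : Int × Int, f p = String.ofList (PySem.Chars.slice cs (some p.1) (some p.2))) :
    ∀ cuts : List Int, (cuts.zip cuts.tail).map f = pvPm cs cuts := by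
  intro cuts
  induction cuts with
  | nil => rfl
  | cons a t ih =>
    cases t with
    | nil => rfl
    | cons b t' =>
      simp only [List.tail_cons, List.zip_cons_cons, List.map_cons, pvPm, hf]
      have := ih
      simp only [List.tail_cons] at this
      rw [this]

-- run invariant: all adjacent pairs strictly inside (left, right) are equal
def pvAdj (cs : List Char) (left right : Nat) : Prop :=
  ∀ k, left < k → k < right → cs.getD k ' ' = cs.getD (k - 1) ' '

lemma pvChain (cs : List Char) (left : Nat) :
    ∀ right, left < right → pvAdj cs left right → cs.getD (right - 1) ' ' = cs.getD left ' ' := by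
  intro right
  induction right with
  | zero => omega
  | succ r ih =>
    intro hlt hadj
    rcases Nat.lt_or_ge left r with h | h
    · have hr : cs.getD r ' ' = cs.getD (r - 1) ' ' := hadj r h (Nat.lt_succ_self r)
      have h2 := ih h (fun k hk1 hk2 => hadj k hk1 (Nat.lt_succ_of_lt hk2))
      calc cs.getD (r + 1 - 1) ' ' = cs.getD r ' ' := by norm_num
        _ = cs.getD (r - 1) ' ' := hr
        _ = cs.getD left ' ' := h2
    · have : left = r := by omega
      subst this; simp

lemma pvBl_stop (cs : List Char) : pvBl cs cs.length = [] := by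
  simp [pvBl, PySem.List.pyRange]

lemma pvBl_cons (cs : List Char) (i : Nat) (h1 : 1 ≤ i) (h : i < cs.length) :
    pvBl cs i =
      if cs.getD i ' ' ≠ cs.getD (i - 1) ' ' then (i : Int) :: pvBl cs (i + 1)
      else pvBl cs (i + 1) := by
  unfold pvBl
  rw [PySem.List.pyRange_one_cons (by exact_mod_cast h)]
  have hcast : (i : Int) + 1 = ((i + 1 : Nat) : Int) := by push_cast; ring
  have hcast2 : (i : Int) - 1 = ((i - 1 : Nat) : Int) := by omega
  rw [hcast, List.filter_cons, hcast2]
  simp only [PySem.List.pyGetD_natCast, decide_not, Bool.not_eq_eq_eq_not, Bool.not_true,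
    decide_eq_false_iff_not, ne_eq, ite_not]

lemma pvLoop (cs : List Char) :
    ∀ d right left slices char_win, cs.length - right = d →
      left < right → right ≤ cs.length → pvAdj cs left right →
      genA_loop cs slices left right char_win =
        slices ++ pvPm cs ((left : Int) :: (pvBl cs right ++ [(cs.length : Int)])) := by
  intro d
  induction d with
  | zero =>
    intro right left slices cw hd h1 h2 _
    have hr : right = cs.length := by omega
    subst hr
    rw [genA_loop, dif_neg (lt_irrefl _), pvBl_stop]
    simp [pvPm]
  | succ d ih =>
    intro right left slices cw hd h1 h2 hadj
    have hlt : right < cs.length := by omega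
    have h1' : 1 ≤ right := by omega
    have hget : ∀ (j : Nat), PySem.List.pyGetD cs (j : Int) ' ' = cs.getD j ' ' :=
      fun j => PySem.List.pyGetD_natCast cs j ' '
    have hchain := pvChain cs left right h1 hadj
    rw [genA_loop, dif_pos hlt, pvBl_cons cs right h1' hlt]
    by_cases hc : cs.getD right ' ' = cs.getD left ' '
    · rw [if_pos (by rw [hget, hget]; exact hc), if_neg (show ¬(cs.getD right ' ' ≠ cs.getD (right - 1) ' ') from fun hne => hne (hc.trans hchain.symm))]
      exact ih (right + 1) left slices _ (by omega) (by omega) (by omega)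
        (fun k hk1 hk2 => by
          rcases Nat.lt_or_ge k right with hk | hk
          · exact hadj k hk1 hk
          · have : k = right := by omega
            subst this
            rw [hc, ← hchain])
    · rw [if_neg (by rw [hget, hget]; exact hc),
        if_pos (fun habs => hc (habs.trans hchain))]
      rw [ih (right + 1) right (slices ++ [String.ofList (PySem.Chars.slice cs (some (left : Int)) (some (right : Int)))]) _
        (by omega) (by omega) (by omega) (fun k hk1 hk2 => by omega)]
      simp [pvPm]

lemma pvAltChar (s : String) :
    generate_slices_alt s =
      pvPm s.toList (0 :: (pvBl s.toList 1 ++ [(s.toList.length : Int)])) := by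
  simp only [generate_slices_alt, gsCuts]
  have hfun :
      (fun (cuts : List Int) i =>
        if PySem.List.pyGetD s.toList i ' ' ≠ PySem.List.pyGetD s.toList (i - 1) ' ' then
          cuts ++ [i] else cuts)
      = (fun (cuts : List Int) i =>
        if (fun j => decide (PySem.List.pyGetD s.toList j ' ' ≠ PySem.List.pyGetD s.toList (j - 1) ' ')) i = true
        then cuts ++ [id i] else cuts) := by
    funext cuts i; simp
  rw [hfun, PySem.List.foldl_append_if, PySem.List.slice_from_one,
    pvPm_zip s.toList _ (fun p => rfl)]
  congr 1
  simp [pvBl, List.map_id]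

-- ===== VERDICT (by name: the statement is the Claim_ definition above) =====
theorem generate_slices_spec : Claim_equal_generate_slices := by
  intro s _
  unfold Spec_generate_slices
  rw [pvAltChar]
  unfold generate_slices
  rcases Nat.eq_zero_or_pos s.toList.length with h | h
  · have hnil : s.toList = [] := List.length_eq_zero_iff.mp h
    rw [hnil, genA_loop]
    simp [pvBl, pvPm, PySem.List.pyRange, PySem.Chars.slice, PySem.List.slice]
  · rw [pvLoop s.toList (s.toList.length - 1) 1 0 [] [] (by omega) (by omega) h
      (fun k hk1 hk2 => by omega)]
    simp
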